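-- pv_equiv track=rewrite | github.com/qzhou0/aiSpr19 | wordladder/uasi.py | vowelShift
-- ===== SOURCE A (Python) =====
-- def vowelShift(word):
--     V={'a','e','i','o','u'}
--     def is_goodY(word,i):
--         if i+1>=len(word):
--             return True
--         if word[i+1] not in V:
--             return True
--         return False
--     i = 0
--     current=''
--     first=-1
--     while i<len(word):
--         cha = word[i]
--
--         if cha in V or (cha=='y' and is_goodY(word,i)) :
--             if first == -1:
--                 first = i
--             else:
--                 word=word[:i]+current+word[i+1:]
--             current = cha
--         i+=1
--     if first !=-1 and current !='':
--         word=word[:first]+current+word[first+1:]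
--     return word
-- ===== SOURCE B (Python) =====
-- def vowelShift(word):
--     V = {'a', 'e', 'i', 'o', 'u'}
--     n = len(word)
--
--     def vowelish(i, c):
--         return c in V or (c == 'y' and (i + 1 >= n or word[i + 1] not in V))
--
--     chars = [c for i, c in enumerate(word) if vowelish(i, c)]
--     if not chars:
--         return word
--     out = list(word)
--     prev = chars[-1]
--     for i, c in enumerate(word):
--         if vowelish(i, c):
--             out[i] = prev
--             prev = c
--     return ''.join(out)
-- ===== Notes on version B (the rewrite author's own statement) =====
-- stated objective: alternative
-- what changed: B precomputes the list of vowel/good-y characters once and writes the right-rotated characters into a fresh char list in a single forward pass, instead of A's stateful while loop that re-splices the whole string (word[:i]+current+word[i+1:]) at every vowel and patches the first vowel position afterwards.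
import Mathlib
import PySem

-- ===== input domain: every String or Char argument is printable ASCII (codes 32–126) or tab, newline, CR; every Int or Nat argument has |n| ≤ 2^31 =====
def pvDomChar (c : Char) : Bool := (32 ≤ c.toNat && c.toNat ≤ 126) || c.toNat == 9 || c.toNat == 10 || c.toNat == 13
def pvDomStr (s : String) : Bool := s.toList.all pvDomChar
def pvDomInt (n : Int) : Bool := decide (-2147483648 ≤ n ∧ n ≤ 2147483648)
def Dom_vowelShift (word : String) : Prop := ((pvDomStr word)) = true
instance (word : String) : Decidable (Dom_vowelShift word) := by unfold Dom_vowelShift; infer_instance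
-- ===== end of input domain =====

-- B right-rotates the vowel (and good-y) characters by precomputing them and writing the
-- rotation into a fresh char list, instead of A's repeated string-splice rewriting;
-- equality of return values is proved for all inputs.

-- ===== PORT A =====
-- c in V
def aV (c : Char) : Bool := c == 'a' || c == 'e' || c == 'i' || c == 'o' || c == 'u'

-- is_goodY(word, i)
def aGoodY (w : List Char) (i : Nat) : Bool :=
  if w.length ≤ i + 1 then true
  else !(aV (w.getD (i+1) ' '))   -- word[i+1], in range here

-- the while loop; state (word, current, first); fuel = number of remaining iterations
-- (the loop runs exactly len(word) - i times since splicing preserves the length).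
def aLoop : Nat → List Char → Nat → List Char → Int → List Char × List Char × Int
  | 0, w, _, current, first => (w, current, first)
  | fuel + 1, w, i, current, first =>
    if i < w.length then
      let cha := w.getD i ' '   -- word[i], in range
      if aV cha || (cha == 'y' && aGoodY w i) then
        if first == -1 then
          aLoop fuel w (i+1) [cha] (Int.ofNat i)
        else
          -- word = word[:i] + current + word[i+1:]  (slices with 0 ≤ i < len: take/drop are exact)
          aLoop fuel (w.take i ++ current ++ w.drop (i+1)) (i+1) [cha] first
      else aLoop fuel w (i+1) current first
    else (w, current, first)

def vowelShift (word : String) : String :=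
  let w := word.toList
  let r := aLoop w.length w 0 [] (-1)
  -- final fix-up: word = word[:first] + current + word[first+1:]; here first ≥ 0, so
  -- toNat is exact and the slices are the in-range take/drop
  let w' := if r.2.2 != -1 && r.2.1 != [] then
              r.1.take r.2.2.toNat ++ r.2.1 ++ r.1.drop (r.2.2.toNat + 1)
            else r.1
  String.ofList w'

-- ===== PORT B =====
-- c in V
def bV (c : Char) : Bool := c == 'a' || c == 'e' || c == 'i' || c == 'o' || c == 'u'

-- vowelish(i, c)
def bGood (w : List Char) (i : Nat) (c : Char) : Bool :=
  bV c || (c == 'y' && (decide (w.length ≤ i + 1) || !(bV (w.getD (i+1) ' '))))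

-- chars = [c for i, c in enumerate(word) if vowelish(i, c)]
def bChars (w : List Char) : List Char :=
  ((w.zipIdx).filter (fun p => bGood w p.2 p.1)).map Prod.fst

-- the for loop writing out[i] = prev at vowelish positions (built structurally)
def bGo (w : List Char) : Nat → List Char → Char → List Char
  | _, [], _ => []
  | i, c :: cs, prev =>
    if bGood w i c then prev :: bGo w (i+1) cs c
    else c :: bGo w (i+1) cs prev

def vowelShift_alt (word : String) : String :=
  let w := word.toList
  let chars := bChars w
  if chars.isEmpty then word
  else String.ofList (bGo w 0 w (chars.getLastD ' '))   -- chars[-1]; chars nonempty here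

-- ===== PRECONDITION & SPEC =====
def Spec_vowelShift (word : String) (out : String) : Prop := out = vowelShift_alt word
instance (word : String) (out : String) : Decidable (Spec_vowelShift word out) := by unfold Spec_vowelShift; infer_instance

-- ===== CLAIM (what is proved, stated in full; the proofs are below) =====
def Claim_equal_vowelShift : Prop := ∀ (word : String), Dom_vowelShift word → Spec_vowelShift word (vowelShift word)

-- ===== LEMMAS AND PROOFS =====

-- the last vowelish character at positions ≥ i (d if none)
def lastV (w : List Char) : Nat → List Char → Char → Char
  | _, [], d => d
  | i, c :: cs, d => lastV w (i+1) cs (if bGood w i c then c else d)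

-- the rotated suffix from position i, with the overall-last vowelish char fed to the
-- first vowelish position encountered
def bTop (w : List Char) : Nat → List Char → List Char
  | _, [] => []
  | i, c :: cs =>
    if bGood w i c then lastV w (i+1) cs c :: bGo w (i+1) cs c
    else c :: bTop w (i+1) cs

-- the final fix-up applied to the loop state, as a function (proof bookkeeping only)
def aFix (r : List Char × List Char × Int) : List Char :=
  if r.2.2 != -1 && r.2.1 != [] then
    r.1.take r.2.2.toNat ++ r.2.1 ++ r.1.drop (r.2.2.toNat + 1)
  else r.1

theorem good_agree (w v : List Char) (i : Nat)
    (hl : w.length = v.length)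
    (ha : ∀ j, i ≤ j → w.getD j ' ' = v.getD j ' ') :
    (aV (w.getD i ' ') || (w.getD i ' ' == 'y' && aGoodY w i))
      = bGood v i (v.getD i ' ') := by
  have h1 := ha i (Nat.le_refl i)
  have h2 := ha (i+1) (Nat.le_succ i)
  unfold aGoodY bGood aV bV
  rw [h1, h2, hl]
  by_cases h : v.length ≤ i + 1 <;> simp [h, Bool.not_or]

theorem getD_splice (w cur : List Char) (i j : Nat) (hc : cur.length = 1) (hj : i + 1 ≤ j) :
    (w.take i ++ cur ++ w.drop (i+1)).getD j ' ' = w.getD j ' ' := by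
  have hlen : (w.take i ++ cur).length = Nat.min i w.length + 1 := by
    simp [hc]
  have hmin1 : Nat.min i w.length ≤ i := Nat.min_le_left _ _
  have hmin2 : Nat.min i w.length ≤ w.length := Nat.min_le_right _ _
  rw [List.getD_eq_getElem?_getD, List.getD_eq_getElem?_getD,
      List.getElem?_append_right (by omega : (w.take i ++ cur).length ≤ j),
      List.getElem?_drop]
  by_cases hiw : i < w.length
  · have hmin : Nat.min i w.length = i := Nat.min_eq_left (Nat.le_of_lt hiw)
    have : i + 1 + (j - (w.take i ++ cur).length) = j := by omega
    rw [this]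
  · have h1 : w[j]? = none := by
      rw [List.getElem?_eq_none_iff]; omega
    have h2 : w[i + 1 + (j - (w.take i ++ cur).length)]? = none := by
      rw [List.getElem?_eq_none_iff]; omega
    rw [h1, h2]

theorem aLoop_phase2 (v : List Char) : ∀ (fuel : Nat) (w : List Char) (i : Nat) (c : Char) (f : Int),
    v.length ≤ i + fuel → w.length = v.length →
    (∀ j, i ≤ j → w.getD j ' ' = v.getD j ' ') → (f == -1) = false →
    aLoop fuel w i [c] f
      = (w.take i ++ bGo v i (v.drop i) c, [lastV v i (v.drop i) c], f) := by
  intro fuel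
  induction fuel with
  | zero =>
    intro w i c f hf hl ha hneg
    have hi : v.length ≤ i := by omega
    simp [aLoop, List.drop_eq_nil_of_le hi, bGo, lastV,
      List.take_of_length_le (by omega : w.length ≤ i)]
  | succ fuel ih =>
    intro w i c f hf hl ha hneg
    by_cases hi : i < w.length
    · have hiv : i < v.length := by omega
      have hcha : w.getD i ' ' = v.getD i ' ' := ha i (Nat.le_refl i)
      have hvd : v.getD i ' ' = v[i] := List.getD_eq_getElem v ' ' hiv
      have hdrop : v.drop i = v[i] :: v.drop (i+1) := List.drop_eq_getElem_cons hiv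
      rw [aLoop]
      simp only [if_pos hi, good_agree w v i hl ha, hneg, Bool.false_eq_true, if_false]
      have hwv : w[i] = v[i] := by
        rw [← List.getD_eq_getElem w ' ' hi, ← hvd]; exact hcha
      have hlen1 : (w.take i ++ [c]).length = i + 1 := by
        simp [List.length_take, Nat.min_eq_left (Nat.le_of_lt hi)]
      by_cases hg : bGood v i (v.getD i ' ') = true
      · rw [if_pos hg]
        have hl' : (w.take i ++ [c] ++ w.drop (i+1)).length = v.length := by
          simp only [List.length_append, List.length_take, List.length_drop,
            Nat.min_eq_left (Nat.le_of_lt hi), List.length_cons, List.length_nil]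
          omega
        have ha' : ∀ j, i + 1 ≤ j →
            (w.take i ++ [c] ++ w.drop (i+1)).getD j ' ' = v.getD j ' ' := by
          intro j hj
          rw [getD_splice w [c] i j rfl hj]
          exact ha j (by omega)
        rw [ih (w.take i ++ [c] ++ w.drop (i+1)) (i+1) (w.getD i ' ') f (by omega) hl' ha' hneg]
        have htk : (w.take i ++ [c] ++ w.drop (i+1)).take (i+1) = w.take i ++ [c] := by
          rw [List.take_append_of_le_length (by omega)]
          exact List.take_of_length_le (by omega)
        rw [htk, hdrop, hcha, hvd]
        rw [hvd] at hg
        simp [bGo, lastV, hg, List.append_assoc]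
      · rw [if_neg hg]
        rw [ih w (i+1) c f (by omega) hl (fun j hj => ha j (by omega)) hneg]
        have htk : w.take (i+1) = w.take i ++ [v[i]] := by
          rw [List.take_add_one, List.getElem?_eq_getElem hi, hwv]; rfl
        conv_rhs => rw [hdrop]
        rw [htk, List.append_assoc]
        rw [hvd] at hg
        simp [bGo, lastV, hg]
    · have hiw : v.length ≤ i := by omega
      rw [aLoop]
      simp [if_neg hi, List.drop_eq_nil_of_le hiw, bGo, lastV,
        List.take_of_length_le (by omega : w.length ≤ i)]

theorem aLoop_phase1 (v : List Char) : ∀ (fuel i : Nat),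
    v.length ≤ i + fuel →
    aFix (aLoop fuel v i [] (-1)) = v.take i ++ bTop v i (v.drop i) := by
  intro fuel
  induction fuel with
  | zero =>
    intro i hf
    have hi : v.length ≤ i := by omega
    simp [aLoop, aFix, List.drop_eq_nil_of_le hi, bTop, List.take_of_length_le hi]
  | succ fuel ih =>
    intro i hf
    by_cases hi : i < v.length
    · have hvd : v.getD i ' ' = v[i] := List.getD_eq_getElem v ' ' hi
      have hdrop : v.drop i = v[i] :: v.drop (i+1) := List.drop_eq_getElem_cons hi
      rw [aLoop]
      simp only [if_pos hi, good_agree v v i rfl (fun _ _ => rfl)]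
      by_cases hg : bGood v i (v.getD i ' ') = true
      · rw [if_pos hg]
        simp only [show ((-1 : Int) == -1) = true by decide, if_true]
        have hfu : v.length ≤ i + 1 + fuel := by omega
        have hne : (Int.ofNat i == -1) = false :=
          beq_eq_false_iff_ne.mpr (by show (i : Int) ≠ -1; omega)
        rw [aLoop_phase2 v fuel v (i+1) (v.getD i ' ') (Int.ofNat i) hfu rfl
          (fun j _ => rfl) hne]
        unfold aFix
        have hcond : ((Int.ofNat i != -1) &&
            ([lastV v (i+1) (v.drop (i+1)) (v.getD i ' ')] != ([] : List Char))) = true := by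
          simp [bne_iff_ne]
        rw [if_pos hcond]
        have htn : (Int.ofNat i).toNat = i := rfl
        have hlen : (v.take (i+1)).length = i + 1 := by
          rw [List.length_take]; exact Nat.min_eq_left (by omega)
        have h1 : (v.take (i+1) ++ bGo v (i+1) (v.drop (i+1)) (v.getD i ' ')).take (Int.ofNat i).toNat
            = v.take i := by
          rw [htn, List.take_append_of_le_length (by omega), List.take_take,
            Nat.min_eq_left (by omega)]
        have h2 : (v.take (i+1) ++ bGo v (i+1) (v.drop (i+1)) (v.getD i ' ')).drop ((Int.ofNat i).toNat + 1)
            = bGo v (i+1) (v.drop (i+1)) (v.getD i ' ') := by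
          rw [htn]
          exact List.drop_left' hlen
        rw [h1, h2, hdrop]
        rw [hvd] at hg ⊢
        simp [bTop, hg, List.append_assoc]
      · rw [if_neg hg]
        rw [ih (i+1) (by omega)]
        have htk : v.take (i+1) = v.take i ++ [v[i]] := by
          rw [List.take_add_one, List.getElem?_eq_getElem hi]; rfl
        conv_rhs => rw [hdrop]
        rw [htk, List.append_assoc]
        rw [hvd] at hg
        simp [bTop, hg]
    · rw [aLoop]
      simp [if_neg hi, aFix, List.drop_eq_nil_of_le (by omega : v.length ≤ i), bTop,
        List.take_of_length_le (by omega : v.length ≤ i)]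

theorem bGo_lastV (v : List Char) : ∀ (rest : List Char) (i : Nat) (d : Char),
    bGo v i rest (lastV v i rest d) = bTop v i rest := by
  intro rest
  induction rest with
  | nil => intro i d; rfl
  | cons c cs ih =>
    intro i d
    by_cases hg : bGood v i c = true
    · simp [bGo, bTop, lastV, hg]
    · simp [bGo, bTop, lastV, hg, ih]

theorem chars_lastV (v : List Char) : ∀ (rest : List Char) (i : Nat) (d : Char),
    (((rest.zipIdx i).filter (fun p => bGood v p.2 p.1)).map Prod.fst).getLastD d
      = lastV v i rest d := by
  intro rest
  induction rest with
  | nil => intro i d; rfl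
  | cons c cs ih =>
    intro i d
    rw [List.zipIdx_cons]
    by_cases hg : bGood v i c = true
    · simp only [List.filter_cons, hg, if_pos, List.map_cons, List.getLastD_cons, lastV, ih]
    · simp only [List.filter_cons, hg, Bool.false_eq_true, if_false, lastV, ih]

theorem bTop_of_chars_nil (v : List Char) : ∀ (rest : List Char) (i : Nat),
    ((rest.zipIdx i).filter (fun p => bGood v p.2 p.1)).map Prod.fst = [] →
    bTop v i rest = rest := by
  intro rest
  induction rest with
  | nil => intro i _; rfl
  | cons c cs ih =>
    intro i h
    rw [List.zipIdx_cons] at h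
    by_cases hg : bGood v i c = true
    · simp [hg] at h
    · simp only [List.filter_cons, hg, Bool.false_eq_true, if_false] at h
      simp [bTop, hg, ih (i+1) h]

-- ===== VERDICT (by name: the statement is the Claim_ definition above) =====
theorem vowelShift_spec : Claim_equal_vowelShift := by
  intro word _
  unfold Spec_vowelShift
  have hA : vowelShift word
      = String.ofList (aFix (aLoop word.toList.length word.toList 0 [] (-1))) := rfl
  have hB : vowelShift_alt word
      = if (bChars word.toList).isEmpty then word
        else String.ofList (bGo word.toList 0 word.toList ((bChars word.toList).getLastD ' ')) := rfl
  rw [hA, aLoop_phase1 word.toList word.toList.length 0 (by omega), hB]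
  simp only [List.take_zero, List.drop_zero, List.nil_append]
  by_cases hc : (bChars word.toList).isEmpty
  · have hnil : bChars word.toList = [] := by
      simpa [List.isEmpty_iff] using hc
    have hrest : bTop word.toList 0 word.toList = word.toList :=
      bTop_of_chars_nil word.toList word.toList 0 (by simpa [bChars] using hnil)
    simp [hc, hrest]
  · simp only [hc, Bool.false_eq_true, if_false]
    have h1 : (bChars word.toList).getLastD ' ' = lastV word.toList 0 word.toList ' ' := by
      simpa [bChars] using chars_lastV word.toList word.toList 0 ' '
    rw [h1, bGo_lastV]
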